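-- pv_equiv track=rewrite | github.com/marhide/advent-of-code | 2023/src/02a_cube_conundrum.py | is_game_possible
-- ===== SOURCE A (Python) =====
-- def is_game_possible(game):
--     game_list = game.replace(',', '').replace(';', '').split(' ')[:1:-1]
--     maximum_number_for_colour = {'red': 12, 'green': 13, 'blue': 14}
--
--     current_colour = ''
--     for item in game_list:
--         if item.isnumeric():
--             if int(item) > maximum_number_for_colour[current_colour]:
--                 return False
--         else:
--             current_colour = item
--
--     return True
-- ===== SOURCE B (Python) =====
-- def is_game_possible(game):
--     maximum_number_for_colour = {'red': 12, 'green': 13, 'blue': 14}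
--     tokens = game.replace(',', '').replace(';', '').split(' ')[2:]
--     pending = []  # counts waiting for the colour word that follows them
--     for token in tokens:
--         if token.isnumeric():
--             pending.append(int(token))
--         else:
--             if any(count > maximum_number_for_colour[token] for count in pending):
--                 return False
--             pending = []
--     return True
-- ===== Notes on version B (the rewrite author's own statement) =====
-- stated objective: alternative
-- what changed: Instead of scanning the token list reversed while remembering the last colour seen, B scans the tokens forward once, buffering counts until the colour word that follows them appears and checking the whole buffer against that colour's limit. Pre_ excludes games where some count token's nearest following word is missing or is not red/green/blue: A raises KeyError on almost all of these and on the rest (reversed scan meets an over-limit count first) returns False while B raises KeyError.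
-- outside the precondition, e.g. on is_game_possible('Game 1: 5 foo 100 red'): A returns False, B raises KeyError
import Mathlib
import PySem

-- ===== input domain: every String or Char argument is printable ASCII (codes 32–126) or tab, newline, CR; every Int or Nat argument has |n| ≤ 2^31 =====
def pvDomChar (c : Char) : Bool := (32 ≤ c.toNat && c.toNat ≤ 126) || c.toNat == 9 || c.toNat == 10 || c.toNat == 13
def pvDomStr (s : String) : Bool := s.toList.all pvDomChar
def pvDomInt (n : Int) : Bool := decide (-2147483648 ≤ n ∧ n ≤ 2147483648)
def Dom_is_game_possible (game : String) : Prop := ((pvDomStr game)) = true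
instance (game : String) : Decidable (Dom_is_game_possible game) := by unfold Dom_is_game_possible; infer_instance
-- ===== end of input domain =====

-- B replaces A's reversed token scan (last colour remembered) by a forward scan that buffers
-- counts until the colour word that follows them appears; same asymptotic cost, no speed claim.

-- ===== PORT A =====
-- shared token cleaning: game.replace(',', '').replace(';', '').split(' ')
def pvTokens (game : String) : List String :=
  (PySem.Str.split? (PySem.Str.replace (PySem.Str.replace game "," "") ";" "") " ").getD []

-- the for-loop of A over game_list with current_colour; on the ASCII domain item.isnumeric()
-- is PySem.Str.strIsdigit; the KeyError lookup (current_colour not in the dict) is the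
-- `none` branch, unreachable inside Pre_, ported as "no exceedance, continue".
def pvGoA (d : PySem.Dict String Int) : List String → String → Bool
  | [], _ => true
  | item :: rest, cc =>
    if PySem.Str.strIsdigit item then
      match d.get? cc with
      | some m => if (PySem.Int.ofStr? item).getD 0 > m then false else pvGoA d rest cc
      | none => pvGoA d rest cc
    else pvGoA d rest item

def is_game_possible (game : String) : Bool :=
  let game_list := (PySem.List.slice? (pvTokens game) none (some 1) (-1)).getD []  -- [:1:-1]
  pvGoA (PySem.Dict.ofList [("red", (12:Int)), ("green", 13), ("blue", 14)]) game_list ""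

-- ===== PORT B =====
-- count > maximum_number_for_colour[token], with the KeyError `none` branch (unreachable
-- inside Pre_) ported as "no exceedance"
def pvExceeds (d : PySem.Dict String Int) (colour : String) (count : Int) : Bool :=
  match d.get? colour with
  | some m => count > m
  | none => false

-- B's forward loop: pending counts buffered until their colour word arrives
def pvGoB (d : PySem.Dict String Int) : List String → List Int → Bool
  | [], _ => true
  | token :: rest, pending =>
    if PySem.Str.strIsdigit token then
      pvGoB d rest (pending ++ [(PySem.Int.ofStr? token).getD 0])
    else
      if pending.any (pvExceeds d token) then false else pvGoB d rest []

def is_game_possible_alt (game : String) : Bool :=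
  let tokens := PySem.List.slice (pvTokens game) (some 2) none  -- [2:]
  pvGoB (PySem.Dict.ofList [("red", (12:Int)), ("green", 13), ("blue", 14)]) tokens []

-- ===== PRECONDITION & SPEC =====
-- the first non-digit token of the list, if any
def pvNextCol : List String → Option String
  | [] => none
  | t :: r => if PySem.Str.strIsdigit t then pvNextCol r else some t

-- every digit-only token is followed (at the nearest later non-digit token) by a known colour
def pvPreOk : List String → Bool
  | [] => true
  | t :: r =>
    (if PySem.Str.strIsdigit t then
      match pvNextCol r with
      | some c => c == "red" || c == "green" || c == "blue"
      | none => false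
     else true) && pvPreOk r

-- Pre_ excludes games where some count token's nearest following word is missing or is not
-- red/green/blue: A raises KeyError on almost all of these and on the rest (its reversed scan
-- meets an over-limit count first) returns False while B raises KeyError.
def Pre_is_game_possible (game : String) : Prop :=
  pvPreOk ((pvTokens game).drop 2) = true
instance (game : String) : Decidable (Pre_is_game_possible game) := by
  unfold Pre_is_game_possible; infer_instance

def pvWitness_is_game_possible : String := "Game 1: 3 blue, 4 red; 1 red, 2 green"

def Spec_is_game_possible (game : String) (out : Bool) : Prop := out = is_game_possible_alt game
instance (game : String) (out : Bool) : Decidable (Spec_is_game_possible game out) := by unfold Spec_is_game_possible; infer_instance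

-- ===== CLAIM (what is proved, stated in full; the proofs are below) =====
def Claim_equal_is_game_possible : Prop := ∀ (game : String), Dom_is_game_possible game → Pre_is_game_possible game → Spec_is_game_possible game (is_game_possible game)

-- ===== LEMMAS AND PROOFS =====

-- xs[i]? read off List.range n for n ≤ |xs| is take n
theorem pv_filterMap_getElem_range {α : Type} (l : List α) (n : Nat) (h : n ≤ l.length) :
    List.filterMap (fun i => l[i]?) (List.range n) = l.take n := by
  induction n with
  | zero => simp
  | succ m ih =>
    have hm : m < l.length := by omega
    rw [List.range_succ, List.filterMap_append, ih (by omega), List.take_add_one]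
    simp [List.getElem?_eq_getElem hm]

-- Python's xs[:1:-1] is (xs.drop 2).reverse
theorem pv_slice_rev_two {α : Type} (xs : List α) :
    PySem.List.slice? xs none (some 1) (-1) = some ((xs.drop 2).reverse) := by
  simp only [PySem.List.slice?, PySem.List.sliceIndices]
  norm_num
  by_cases h : 2 < xs.length
  · rw [if_pos h]
    have hmin : min 1 ((xs.length : Int) - 1) = 1 := by omega
    rw [hmin]
    have hc : ((xs.length : Int) - 1 - 1).toNat = xs.length - 2 := by omega
    rw [hc]
    have hfun : List.filterMap (fun (x : Nat) => xs[((xs.length : Int) - 1 + -(x:Int)).toNat]?)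
        (List.range (xs.length - 2)) =
        List.filterMap (fun (x : Nat) => xs.reverse[x]?) (List.range (xs.length - 2)) := by
      apply List.filterMap_congr
      intro k hk
      rw [List.mem_range] at hk
      have h1 : ((xs.length : Int) - 1 + -(k:Int)).toNat = xs.length - 1 - k := by omega
      rw [h1, List.getElem?_reverse (by omega)]
    rw [hfun, pv_filterMap_getElem_range _ _ (by simp)]
    rw [← List.reverse_drop]
  · rw [if_neg h]
    have : xs.drop 2 = [] := by
      apply List.drop_eq_nil_of_le; omega
    simp [this]

-- current_colour after A's loop has run over xs starting from cc
def pvFinalCC : List String → String → String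
  | [], cc => cc
  | t :: r, cc => if PySem.Str.strIsdigit t then pvFinalCC r cc else pvFinalCC r t

theorem pvFinalCC_append_one (xs : List String) (t : String) (cc : String) :
    pvFinalCC (xs ++ [t]) cc =
      if PySem.Str.strIsdigit t then pvFinalCC xs cc else t := by
  induction xs generalizing cc with
  | nil => simp [pvFinalCC]
  | cons x r ih =>
    simp only [List.cons_append, pvFinalCC]
    by_cases hx : PySem.Str.strIsdigit x = true
    · rw [if_pos hx, ih]; simp only [PySem.Str.strIsdigit_eq] at hx; simp [hx]
    · rw [if_neg hx, ih]; simp only [PySem.Str.strIsdigit_eq] at hx; simp [hx]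

theorem pvFinalCC_reverse (L : List String) (cc : String) :
    pvFinalCC L.reverse cc = (pvNextCol L).getD cc := by
  induction L generalizing cc with
  | nil => simp [pvFinalCC, pvNextCol]
  | cons t r ih =>
    simp only [List.reverse_cons, pvNextCol, pvFinalCC_append_one]
    by_cases ht : PySem.Str.strIsdigit t = true
    · rw [if_pos ht, if_pos ht, ih]
    · rw [if_neg ht, if_neg ht]
      simp

theorem pvGoA_append (d : PySem.Dict String Int) (xs ys : List String) (cc : String) :
    pvGoA d (xs ++ ys) cc = (pvGoA d xs cc && pvGoA d ys (pvFinalCC xs cc)) := by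
  induction xs generalizing cc with
  | nil => simp [pvGoA, pvFinalCC]
  | cons t r ih =>
    simp only [List.cons_append, pvGoA, pvFinalCC]
    by_cases ht : PySem.Str.strIsdigit t = true
    · rw [if_pos ht, if_pos ht]
      cases hcc : d.get? cc with
      | none => simp only [ih]; simp only [PySem.Str.strIsdigit_eq] at ht; simp [ht]
      | some m =>
        by_cases hgt : (PySem.Int.ofStr? t).getD 0 > m
        · simp [hgt]
        · simp only [if_neg hgt, ih]; simp only [PySem.Str.strIsdigit_eq] at ht; simp [ht]
    · rw [if_neg ht, if_neg ht, ih]; simp only [PySem.Str.strIsdigit_eq] at ht; simp [ht]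

-- one step of A on a single digit token is a pvExceeds check
theorem pvGoA_single_digit (d : PySem.Dict String Int) (t : String) (cc : String)
    (ht : PySem.Str.strIsdigit t = true) :
    pvGoA d [t] cc = !pvExceeds d cc ((PySem.Int.ofStr? t).getD 0) := by
  simp only [pvGoA, pvExceeds, if_pos ht]
  cases d.get? cc with
  | none => simp
  | some m =>
    by_cases hgt : (PySem.Int.ofStr? t).getD 0 > m
    · simp [hgt]
    · simp [hgt]

-- the bridge: B's forward buffering loop versus A's loop over the reversed list
theorem pv_bridge (d : PySem.Dict String Int) (hd : d.get? "" = none) (L : List String) (p : List Int) :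
    pvGoB d L p =
      (p.all (fun c => !pvExceeds d ((pvNextCol L).getD "") c) && pvGoA d L.reverse "") := by
  induction L generalizing p with
  | nil => simp [pvGoB, pvGoA, pvNextCol, pvExceeds, hd]
  | cons t r ih =>
    simp only [pvGoB, List.reverse_cons, pvNextCol]
    by_cases ht : PySem.Str.strIsdigit t = true
    · rw [if_pos ht, if_pos ht, ih,
        pvGoA_append d r.reverse [t] "", pvFinalCC_reverse,
        pvGoA_single_digit d t _ ht]
      simp only [List.all_append, List.all_cons, List.all_nil]
      cases hp : p.all (fun c => !pvExceeds d ((pvNextCol r).getD "") c) <;>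
        cases hx : pvExceeds d ((pvNextCol r).getD "") ((PySem.Int.ofStr? t).getD 0) <;>
        cases hg : pvGoA d r.reverse "" <;> simp
    · rw [if_neg ht, if_neg ht, ih,
        pvGoA_append d r.reverse [t] ""]
      have hsingle : pvGoA d [t] (pvFinalCC r.reverse "") = true := by
        simp only [pvGoA]
        rw [if_neg ht]
      rw [hsingle]
      simp only [List.all_nil, Bool.true_and, Bool.and_true, Option.getD_some]
      cases hany : p.any (pvExceeds d t) with
      | true =>
        have : p.all (fun c => !pvExceeds d t c) = false := by
          simp [List.all_eq_not_any_not]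
          simpa using hany
        simp [this]
      | false =>
        have : p.all (fun c => !pvExceeds d t c) = true := by
          simp [List.all_eq_not_any_not]
          simpa using hany
        simp [this]

-- ===== VERDICT (by name: the statement is the Claim_ definition above) =====
theorem is_game_possible_spec : Claim_equal_is_game_possible := by
  intro game _ _
  unfold Spec_is_game_possible is_game_possible is_game_possible_alt
  rw [pv_slice_rev_two]
  have hs : PySem.List.slice (pvTokens game) (some 2) none = (pvTokens game).drop 2 := by
    rw [PySem.List.slice_from _ (by norm_num)]
    rfl
  simp only [Option.getD_some, hs]
  rw [pv_bridge _ (by decide)]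
  rw [List.all_nil, Bool.true_and]
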